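-- pv_equiv track=rewrite | github.com/TaeWoongYoun/programmersGather | 프로그래머스/0/120812. 최빈값 구하기/최빈값 구하기.py | solution
-- ===== SOURCE A (Python) =====
-- def solution(array):
--     counts = {}
--     max_count = 0
--     answer = 0
--
--     for num in array:
--         counts[num] = counts.get(num, 0) + 1
--         if counts[num] > max_count:
--             max_count = counts[num]
--             answer = num
--         elif counts[num] == max_count:
--             answer = -1
--
--     return answer
-- ===== SOURCE B (Python) =====
-- def solution(array):
--     counts = {}
--     for num in array:
--         counts[num] = counts.get(num, 0) + 1
--     m = max(counts.values())
--     modes = [k for k, c in counts.items() if c == m]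
--     return modes[0] if len(modes) == 1 else -1
-- ===== Notes on version B (the rewrite author's own statement) =====
-- stated objective: idiomatic
-- what changed: A interleaves counting with a running maximum and an inline tie flag in one streaming pass; B decomposes the task: build the full frequency table first, then take the maximum count, then collect the keys achieving it and return the unique one or -1.
-- outside the precondition, e.g. on solution([]): A returns 0, B raises ValueError
import Mathlib
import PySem

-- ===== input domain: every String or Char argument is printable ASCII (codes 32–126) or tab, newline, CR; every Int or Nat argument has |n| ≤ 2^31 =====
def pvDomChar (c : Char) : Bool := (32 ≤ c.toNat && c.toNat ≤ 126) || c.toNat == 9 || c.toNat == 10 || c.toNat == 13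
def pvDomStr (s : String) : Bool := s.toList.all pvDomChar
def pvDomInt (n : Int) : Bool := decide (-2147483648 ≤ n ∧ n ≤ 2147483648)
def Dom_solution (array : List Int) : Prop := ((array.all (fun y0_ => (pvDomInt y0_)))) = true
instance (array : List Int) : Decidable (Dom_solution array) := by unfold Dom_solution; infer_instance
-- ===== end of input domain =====

-- B re-implements A's one-pass mode-with-tie-flag as a count-all-then-scan decomposition;
-- same result on every nonempty list (objective: idiomatic; not claimed faster).

-- ===== PORT A =====
-- loop body of A: counts[num] = counts.get(num, 0) + 1; then the >/== comparison chain
def solutionStep (st : PySem.Dict Int Int × Int × Int) (num : Int) :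
    PySem.Dict Int Int × Int × Int :=
  let c := st.1.getD num 0 + 1
  let counts := st.1.insert num c
  if c > st.2.1 then (counts, c, num)
  else if c = st.2.1 then (counts, st.2.1, (-1 : Int))
  else (counts, st.2.1, st.2.2)

def solution (array : List Int) : Int :=
  (array.foldl solutionStep (PySem.Dict.empty, (0 : Int), (0 : Int))).2.2

-- ===== PORT B =====
-- counting loop of B: counts[num] = counts.get(num, 0) + 1
def bfold (d : PySem.Dict Int Int) (num : Int) : PySem.Dict Int Int :=
  d.insert num (d.getD num 0 + 1)

def solution_alt (array : List Int) : Int :=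
  let counts := array.foldl bfold PySem.Dict.empty
  match PySem.List.max? counts.values (fun x => x) with
  | none => 0  -- max() of the empty values: Python raises ValueError here; outside Pre_solution
  | some m =>
    let modes := (counts.items.filter (fun kc => kc.2 == m)).map (fun kc => kc.1)
    if modes.length = 1 then modes.headI else -1  -- modes[0] of the length-1 list

-- ===== PRECONDITION & SPEC =====
-- Pre_ excludes only the empty list: there A returns its initial sentinel 0 (no mode exists),
-- while B's max() over the empty count table raises ValueError.
def Pre_solution (array : List Int) : Prop := array ≠ []
instance (array : List Int) : Decidable (Pre_solution array) := by unfold Pre_solution; infer_instance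
def pvWitness_solution : List Int := [1, 2, 2]
def Spec_solution (array : List Int) (out : Int) : Prop := out = solution_alt array
instance (array : List Int) (out : Int) : Decidable (Spec_solution array out) := by unfold Spec_solution; infer_instance

-- ===== CLAIM (what is proved, stated in full; the proofs are below) =====
def Claim_equal_solution : Prop := ∀ (array : List Int), Dom_solution array → Pre_solution array → Spec_solution array (solution array)

-- ===== LEMMAS AND PROOFS =====

-- occurrence count of k in p, as a Python int
def cnt (p : List Int) (k : Int) : Int := (p.count k : Int)
-- the values of Counter(p), in key-first-occurrence order
def vals (p : List Int) : List Int := (PySem.Set.ofList p).map (fun k => cnt p k)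
-- max(Counter(p).values()) (none on empty p)
def Mval (p : List Int) : Option Int := PySem.List.max? (vals p) (fun x => x)
-- the keys of count m, in first-occurrence order
def modesOf (p : List Int) (m : Int) : List Int :=
  (PySem.Set.ofList p).filter (fun k => cnt p k == m)
-- the common specification both programs compute
def ansOf (p : List Int) : Int :=
  match Mval p with
  | none => 0
  | some m => if (modesOf p m).length = 1 then (modesOf p m).headI else -1

lemma cnt_append (p : List Int) (n k : Int) :
    cnt (p ++ [n]) k = cnt p k + (if n = k then 1 else 0) := by
  by_cases h : n = k
  · subst h; simp [cnt, List.count_append]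
  · simp [cnt, List.count_append, h]

lemma Mval_some {p : List Int} (hp : p ≠ []) : ∃ m, Mval p = some m := by
  cases h : Mval p with
  | some m => exact ⟨m, rfl⟩
  | none =>
    exfalso
    have hv : vals p = [] := (PySem.List.max?_eq_none_iff _ _).mp h
    obtain ⟨x, hx⟩ := List.exists_mem_of_ne_nil p hp
    have : x ∈ PySem.Set.ofList p := (PySem.Set.mem_ofList p x).mpr hx
    have : cnt p x ∈ vals p := List.mem_map_of_mem this
    simp [hv] at this

lemma Mval_attained {p : List Int} {m : Int} (h : Mval p = some m) :
    ∃ k ∈ p, cnt p k = m := by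
  have hm := PySem.List.max?_mem h
  obtain ⟨k, hk, hck⟩ := List.mem_map.mp hm
  exact ⟨k, (PySem.Set.mem_ofList p k).mp hk, hck⟩

lemma Mval_ub {p : List Int} {m : Int} (h : Mval p = some m) {k : Int} (hk : k ∈ p) :
    cnt p k ≤ m := by
  have : cnt p k ∈ vals p :=
    List.mem_map_of_mem ((PySem.Set.mem_ofList p k).mpr hk)
  exact PySem.List.max?_isMax h _ this

lemma Mval_char {p : List Int} {m k0 : Int} (hk0 : k0 ∈ p) (hc : cnt p k0 = m)
    (hub : ∀ k ∈ p, cnt p k ≤ m) : Mval p = some m := by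
  obtain ⟨m', hm'⟩ := Mval_some (List.ne_nil_of_mem hk0)
  obtain ⟨k1, hk1, hc1⟩ := Mval_attained hm'
  have h1 : m ≤ m' := hc ▸ Mval_ub hm' hk0
  have h2 : m' ≤ m := hc1 ▸ hub k1 hk1
  rw [hm', le_antisymm h2 h1]

lemma Mval_append {p : List Int} {m : Int} (n : Int) (hm : Mval p = some m) :
    Mval (p ++ [n]) = some (max m (cnt p n + 1)) := by
  have hub : ∀ k ∈ p ++ [n], cnt (p ++ [n]) k ≤ max m (cnt p n + 1) := by
    intro k hk
    rw [cnt_append]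
    by_cases hkn : n = k
    · subst hkn; simp
    · rw [if_neg hkn, add_zero]
      rcases List.mem_append.mp hk with h | h
      · exact le_max_of_le_left (Mval_ub hm h)
      · simp at h; exact absurd h.symm hkn
  by_cases hle : m ≤ cnt p n + 1
  · have hmem : n ∈ p ++ [n] := List.mem_append_right _ (by simp)
    have : cnt (p ++ [n]) n = max m (cnt p n + 1) := by
      rw [cnt_append]; simp; omega
    exact Mval_char hmem this hub
  · obtain ⟨k0, hk0, hc0⟩ := Mval_attained hm
    have hk0n : k0 ≠ n := by
      intro h; subst h; omega
    have hmem : k0 ∈ p ++ [n] := List.mem_append_left _ hk0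
    have hnk0 : n ≠ k0 := fun h => hk0n h.symm
    have : cnt (p ++ [n]) k0 = max m (cnt p n + 1) := by
      rw [cnt_append, if_neg hnk0]
      omega
    exact Mval_char hmem this hub

lemma filter_eq_singleton {l : List Int} {pred : Int → Bool} {n : Int}
    (hnd : l.Nodup) (hn : n ∈ l) (hpred : ∀ k ∈ l, pred k = true ↔ k = n) :
    l.filter pred = [n] := by
  induction l with
  | nil => simp at hn
  | cons x t ih =>
    rcases List.nodup_cons.mp hnd with ⟨hxt, hndt⟩
    by_cases hx : x = n
    · subst hx
      have : t.filter pred = [] := by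
        apply List.filter_eq_nil_iff.mpr
        intro k hk hpk
        have := (hpred k (List.mem_cons_of_mem _ hk)).mp hpk
        exact hxt (this ▸ hk)
      simp [(hpred x (List.mem_cons_self)).mpr rfl, this]
    · have hnt : n ∈ t := by
        rcases List.mem_cons.mp hn with h | h
        · exact absurd h.symm hx
        · exact h
      have hpx : pred x = false := by
        rcases h : pred x with _ | _
        · rfl
        · exact absurd ((hpred x List.mem_cons_self).mp h) hx
      simp [hpx]
      exact ih hndt hnt (fun k hk => hpred k (List.mem_cons_of_mem _ hk))

lemma length_ne_one {l : List Int} {a b : Int} (ha : a ∈ l) (hb : b ∈ l) (hab : a ≠ b) :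
    l.length ≠ 1 := by
  intro h
  obtain ⟨x, hx⟩ := List.length_eq_one_iff.mp h
  subst hx
  simp at ha hb
  exact hab (ha.trans hb.symm)

-- the three cases of the step, phrased on the spec side
lemma modes_gt {p : List Int} {m : Int} (n : Int) (hm : Mval p = some m)
    (hgt : m < cnt p n + 1) : modesOf (p ++ [n]) (cnt p n + 1) = [n] := by
  apply filter_eq_singleton (PySem.Set.nodup_ofList _)
    ((PySem.Set.mem_ofList _ n).mpr (List.mem_append_right _ (by simp)))
  intro k hk
  have hk' : k ∈ p ++ [n] := (PySem.Set.mem_ofList _ k).mp hk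
  constructor
  · intro hpk
    by_contra hkn
    have hkp : k ∈ p := by
      rcases List.mem_append.mp hk' with h | h
      · exact h
      · simp at h; exact absurd h hkn
    have h1 : cnt (p ++ [n]) k = cnt p k := by
      rw [cnt_append, if_neg (fun h => hkn h.symm), add_zero]
    have h2 : cnt p k ≤ m := Mval_ub hm hkp
    rw [beq_iff_eq] at hpk
    omega
  · intro h; subst h
    rw [beq_iff_eq, cnt_append]; simp

lemma modes_lt {p : List Int} {m : Int} (n : Int)
    (hlt : cnt p n + 1 < m) : modesOf (p ++ [n]) m = modesOf p m := by
  unfold modesOf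
  have hcn : cnt p n ≤ m := by omega
  have hcongr : ∀ k ∈ PySem.Set.ofList (p ++ [n]),
      (cnt (p ++ [n]) k == m) = (cnt p k == m) := by
    intro k _
    by_cases hkn : n = k
    · subst hkn
      have h1 : cnt (p ++ [n]) n = cnt p n + 1 := by rw [cnt_append]; simp
      rw [h1]
      have : (cnt p n + 1 == m) = false := by simp; omega
      have h2 : (cnt p n == m) = false := by simp; omega
      simp [this, h2]
    · rw [cnt_append]; simp [hkn]
  rw [List.filter_congr hcongr]
  rw [PySem.Set.ofList_append_singleton]
  by_cases hnp : n ∈ PySem.Set.ofList p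
  · rw [PySem.Set.add_of_mem hnp]
  · rw [PySem.Set.add_of_not_mem hnp, List.filter_append]
    have : (cnt p n == m) = false := by simp; omega
    simp [this]

-- A's fold over a nonempty list computes (Counter(p), max count, ansOf p)
lemma A_inv (p : List Int) (hp : p ≠ []) :
    p.foldl solutionStep (PySem.Dict.empty, (0 : Int), (0 : Int)) =
      (p.foldl bfold PySem.Dict.empty, (Mval p).getD 0, ansOf p) := by
  induction p using List.reverseRecOn with
  | nil => exact absurd rfl hp
  | append_singleton p n ih =>
    rw [List.foldl_append, List.foldl_append]
    by_cases hpn : p = []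
    · subst hpn
      simp [solutionStep, bfold, ansOf, Mval, vals, modesOf, cnt,
        PySem.Set.ofList, PySem.Set.add, PySem.List.max?]
    · rw [ih hpn]
      obtain ⟨m, hm⟩ := Mval_some hpn
      have hgetD : (p.foldl bfold PySem.Dict.empty).getD n 0 = cnt p n := by
        have := PySem.Dict.getD_foldl_insert_add_one p PySem.Dict.empty n
        simpa [bfold, cnt] using this
      have hM' := Mval_append n hm
      have hdict : (p.foldl bfold PySem.Dict.empty).insert n (cnt p n + 1) =
          (p ++ [n]).foldl bfold PySem.Dict.empty := by
        rw [List.foldl_append]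
        simp [bfold, hgetD]
      simp only [List.foldl_cons, List.foldl_nil]
      dsimp only [solutionStep]
      rw [hgetD, hm]
      simp only [Option.getD_some]
      rcases lt_trichotomy m (cnt p n + 1) with hlt | heq | hgt
      · -- counts[num] > max_count: answer := num
        rw [if_pos hlt]
        have hmax : max m (cnt p n + 1) = cnt p n + 1 := by omega
        rw [hdict]
        have hans : ansOf (p ++ [n]) = n := by
          unfold ansOf
          rw [hM', hmax]
          dsimp only
          rw [modes_gt n hm hlt]
          simp
        simp [bfold, hgetD, hans, hM', hmax, ← hdict]
      · -- counts[num] == max_count: answer := -1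
        rw [if_neg (by omega), if_pos heq.symm]
        have hmax : max m (cnt p n + 1) = m := by omega
        rw [hdict]
        have hans : ansOf (p ++ [n]) = -1 := by
          unfold ansOf
          rw [hM', hmax]
          dsimp only
          have hnmem : n ∈ modesOf (p ++ [n]) m := by
            unfold modesOf
            apply List.mem_filter.mpr
            refine ⟨(PySem.Set.mem_ofList _ n).mpr (List.mem_append_right _ (by simp)), ?_⟩
            rw [beq_iff_eq, cnt_append]; simp; omega
          obtain ⟨k0, hk0, hc0⟩ := Mval_attained hm
          have hk0n : k0 ≠ n := by intro h; subst h; omega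
          have hk0mem : k0 ∈ modesOf (p ++ [n]) m := by
            unfold modesOf
            apply List.mem_filter.mpr
            refine ⟨(PySem.Set.mem_ofList _ k0).mpr (List.mem_append_left _ hk0), ?_⟩
            rw [beq_iff_eq, cnt_append, if_neg (fun h => hk0n h.symm)]
            omega
          rw [if_neg (length_ne_one hk0mem hnmem hk0n)]
        simp [bfold, hgetD, hans, hM', hmax, ← hdict]
      · -- counts[num] < max_count: answer unchanged
        rw [if_neg (by omega), if_neg (by omega)]
        have hmax : max m (cnt p n + 1) = m := by omega
        rw [hdict]
        have hans : ansOf (p ++ [n]) = ansOf p := by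
          unfold ansOf
          rw [hM', hmax, hm]
          dsimp only
          rw [modes_lt n hgt]
        simp [bfold, hgetD, hans, hM', hmax, ← hdict]

-- B computes ansOf
lemma alt_eq (p : List Int) : solution_alt p = ansOf p := by
  unfold solution_alt ansOf
  rw [show p.foldl bfold PySem.Dict.empty = PySem.Dict.counter p from
    PySem.Dict.foldl_insert_getD_add_one_eq_counter p]
  dsimp only
  have hvals : (PySem.Dict.counter p).values = vals p := by
    show ((PySem.Dict.counter p).items).map _ = _
    rw [PySem.Dict.items_counter]
    simp [vals, cnt, List.map_map, Function.comp_def]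
  rw [show PySem.List.max? (PySem.Dict.counter p).values (fun x => x) = Mval p by
    rw [hvals]; rfl]
  cases h : Mval p with
  | none => rfl
  | some m =>
    dsimp only
    have hmodes : ((PySem.Dict.counter p).items.filter (fun kc => kc.2 == m)).map
        (fun kc => kc.1) = modesOf p m := by
      rw [PySem.Dict.items_counter, List.filter_map, List.map_map]
      simp [modesOf, cnt, Function.comp_def]
    simp only [hmodes]

-- ===== VERDICT (by name: the statement is the Claim_ definition above) =====
theorem solution_spec : Claim_equal_solution := by
  intro array _ hpre
  unfold Spec_solution
  rw [alt_eq]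
  unfold solution
  rw [A_inv array hpre]
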